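-- pv_equiv track=rewrite | github.com/Thanatoz-1/EmotionStimuli | src/emotion/evaluation/convert_to_span.py | conv2span
-- ===== SOURCE A (Python) =====
-- from typing import List
--
-- def conv2span(annot_brown: list) -> List[dict]:
--     """Extract the spans (i.e. consecutive sequences of either
--     'O'- or 'B'/'I'-tags) from a sentences's annotation.
--
--     Args:
--         annot_brown (list): list of annotations in brown format:
--         [
--             ("token", "tag"),
--             ...
--         ]
--
--     Returns:
--         [type]: list of spans (each span is a dictionary):
--         [
--             {IndexOfTokenInSentence:
--                 "tag"
--             },
--             ...
--         ]
--     """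
--     all_spans = []
--     current_span = {}
--     iob_tags = [iob_tag for (token, iob_tag) in annot_brown]
--
--     for i in range(len(iob_tags)):
--         iob_tag = iob_tags[i]
--         if i == 0:
--             current_span[i] = iob_tag
--         elif iob_tag == "I" and current_span[i - 1] in ["B", "I"]:
--             current_span[i] = iob_tag
--         elif iob_tag == "O" and current_span[i - 1] == "O":
--             current_span[i] = iob_tag
--         else:
--             all_spans.append(current_span)
--             current_span = {}
--             current_span[i] = iob_tag
--
--         if i == len(iob_tags) - 1:
--             all_spans.append(current_span)
--         else:
--             pass
--
--     return all_spans
-- ===== SOURCE B (Python) =====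
-- def _cont(prev, cur):
--     return (cur == "I" and prev in ("B", "I")) or (cur == "O" and prev == "O")
--
-- def conv2span(annot_brown):
--     tags = [t for (_, t) in annot_brown]
--     n = len(tags)
--     if n == 0:
--         return []
--     bounds = [0] + [i for i in range(1, n) if not _cont(tags[i - 1], tags[i])]
--     return [{j: tags[j] for j in range(b, e)} for b, e in zip(bounds, bounds[1:] + [n])]
-- ===== Notes on version B (the rewrite author's own statement) =====
-- stated objective: alternative
-- what changed: Replaces A's single-pass grow-and-flush dict accumulator with a two-pass structure: first compute the list of span-boundary indices (0 plus every index where the continuation rule fails), then slice each consecutive boundary pair into a dict by comprehension.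
import Mathlib
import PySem

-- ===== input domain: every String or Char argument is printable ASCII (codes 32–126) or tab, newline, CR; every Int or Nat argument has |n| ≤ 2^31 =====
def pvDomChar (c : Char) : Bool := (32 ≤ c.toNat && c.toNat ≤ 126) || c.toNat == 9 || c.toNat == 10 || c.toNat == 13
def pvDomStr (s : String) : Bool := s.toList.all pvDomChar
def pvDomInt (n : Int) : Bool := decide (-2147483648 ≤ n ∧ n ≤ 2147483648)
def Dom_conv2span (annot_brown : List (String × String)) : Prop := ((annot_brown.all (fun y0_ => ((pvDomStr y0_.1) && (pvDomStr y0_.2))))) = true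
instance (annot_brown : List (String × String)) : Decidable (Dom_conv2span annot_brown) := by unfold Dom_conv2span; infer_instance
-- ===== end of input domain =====

-- B replaces A's grow-and-flush accumulator loop with a boundary-indices-then-slices two-pass
-- structure (alternative decomposition, same O(n) cost).

-- ===== PORT A =====
-- the for-loop of A as structural recursion over the remaining indices; state = (all_spans, current_span)
-- current_span is a Python dict; its keys are always fresh when inserted, and current_span[i-1] always
-- exists when read (the getD default "" is never returned), so this is exact.
def conv2spanLoopA (tags : List String) (n : Nat) :
    List Nat → List (List (Int × String)) → PySem.Dict Int String →
      List (List (Int × String)) × PySem.Dict Int String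
  | [], all, cur => (all, cur)
  | i :: rest, all, cur =>
    let tag := tags.getD i ""     -- iob_tags[i], index always in range
    let st :=
      if i = 0 then (all, cur.insert (i : Int) tag)
      else
        let prev := cur.getD ((i : Int) - 1) ""   -- current_span[i-1], always present
        if tag == "I" && (prev == "B" || prev == "I") then (all, cur.insert (i : Int) tag)
        else if tag == "O" && prev == "O" then (all, cur.insert (i : Int) tag)
        else (all ++ [cur.items], (PySem.Dict.empty : PySem.Dict Int String).insert (i : Int) tag)
    let all' := if i = n - 1 then st.1 ++ [st.2.items] else st.1
    conv2spanLoopA tags n rest all' st.2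

def conv2span (annot_brown : List (String × String)) : List (List (Int × String)) :=
  let iob_tags := annot_brown.map (fun p => p.2)
  (conv2spanLoopA iob_tags iob_tags.length (List.range iob_tags.length) [] PySem.Dict.empty).1

-- ===== PORT B =====
def pvCont (prev cur : String) : Bool :=
  (cur == "I" && (prev == "B" || prev == "I")) || (cur == "O" && prev == "O")

def conv2span_alt (annot_brown : List (String × String)) : List (List (Int × String)) :=
  let tags := annot_brown.map (fun p => p.2)
  let n := tags.length
  if n = 0 then []
  else
    let bounds := 0 :: (List.range' 1 (n - 1)).filter
      (fun i => !pvCont (tags.getD (i - 1) "") (tags.getD i ""))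
    (bounds.zip (bounds.tail ++ [n])).map
      (fun p => (List.range' p.1 (p.2 - p.1)).map (fun (j : Nat) => ((j : Int), tags.getD j "")))

-- ===== PRECONDITION & SPEC =====
def Spec_conv2span (annot_brown : List (String × String)) (out : List (List (Int × String))) : Prop := out = conv2span_alt annot_brown
instance (annot_brown : List (String × String)) (out : List (List (Int × String))) : Decidable (Spec_conv2span annot_brown out) := by unfold Spec_conv2span; infer_instance

-- ===== CLAIM (what is proved, stated in full; the proofs are below) =====
def Claim_equal_conv2span : Prop := ∀ (annot_brown : List (String × String)), Dom_conv2span annot_brown → Spec_conv2span annot_brown (conv2span annot_brown)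

-- ===== LEMMAS AND PROOFS =====

-- the dict built between indices a (inclusive) and b (exclusive), as an items list
def window (tags : List String) (a b : Nat) : List (Int × String) :=
  (List.range' a (b - a)).map (fun (j : Nat) => ((j : Int), tags.getD j ""))

-- reference recursion: grow the current window, flush at each broken continuation, flush at the end
def goSpans (tags : List String) : Nat → List (Int × String) → List String → List (List (Int × String))
  | _, cur, [] => [cur]
  | i, cur, t :: rest =>
    if pvCont (tags.getD (i - 1) "") t then goSpans tags (i + 1) (cur ++ [((i : Int), t)]) rest
    else cur :: goSpans tags (i + 1) [((i : Int), t)] rest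

-- consecutive boundary pairs to windows
def slices (tags : List String) : List Nat → List (List (Int × String))
  | b :: c :: rest => window tags b c :: slices tags (c :: rest)
  | _ => []

def bnds (tags : List String) (i : Nat) : List Nat :=
  (List.range' i (tags.length - i)).filter
    (fun j => !pvCont (tags.getD (j - 1) "") (tags.getD j ""))

lemma window_cons (tags : List String) (a b : Nat) (h : a < b) :
    window tags a b = ((a : Int), tags.getD a "") :: window tags (a + 1) b := by
  unfold window
  rw [show b - a = (b - (a + 1)) + 1 by omega, List.range'_succ]
  simp

lemma window_concat (tags : List String) (a b : Nat) (h : a ≤ b) :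
    window tags a (b + 1) = window tags a b ++ [((b : Int), tags.getD b "")] := by
  unfold window
  rw [show b + 1 - a = (b - a) + 1 by omega, List.range'_concat]
  simp [show a + (b - a) = b by omega]

lemma contains_mk_window (tags : List String) (a b : Nat) :
    (PySem.Dict.mk (window tags a b)).contains (b : Int) = false := by
  rw [PySem.Dict.contains_mk]
  unfold window
  simp only [List.any_map, List.any_eq_false, Function.comp]
  intro j hj
  rw [List.mem_range'_1] at hj
  simp only [beq_iff_eq, Int.natCast_inj]
  omega

lemma insert_mk_window (tags : List String) (a b : Nat) (h : a ≤ b) :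
    (PySem.Dict.mk (window tags a b)).insert (b : Int) (tags.getD b "") =
      PySem.Dict.mk (window tags a (b + 1)) := by
  apply PySem.Dict.ext
  rw [PySem.Dict.items_insert_of_not_contains _ _ (contains_mk_window tags a b)]
  rw [window_concat tags a b h]

lemma getD_mk_window (tags : List String) :
    ∀ (k a j : Nat), a ≤ j → j < a + k →
    (PySem.Dict.mk (window tags a (a + k))).getD ((j : Int)) "" = tags.getD j "" := by
  intro k
  induction k with
  | zero => intro a j h1 h2; omega
  | succ m ih =>
    intro a j h1 h2
    rw [window_cons tags a (a + (m + 1)) (by omega)]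
    rw [PySem.Dict.getD_eq_get?_getD, PySem.Dict.get?_mk_cons]
    by_cases hja : j = a
    · subst hja; simp
    · rw [if_neg (by simp; omega)]
      rw [← PySem.Dict.getD_eq_get?_getD]
      rw [show a + (m + 1) = (a + 1) + m by omega]
      exact ih (a + 1) j (by omega) (by omega)

lemma getD_mk_window_last (tags : List String) (a b : Nat) (h : a < b) :
    (PySem.Dict.mk (window tags a b)).getD ((b : Int) - 1) "" = tags.getD (b - 1) "" := by
  have hcast : ((b : Int) - 1) = (((b - 1 : Nat)) : Int) := by omega
  rw [hcast, show b = a + (b - a) by omega]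
  rw [show a + (b - a) - 1 = b - 1 by omega]
  exact getD_mk_window tags (b - a) a (b - 1) (by omega) (by omega)

lemma drop_getD_cons (tags : List String) (i : Nat) (h : i < tags.length) :
    tags.drop i = tags.getD i "" :: tags.drop (i + 1) := by
  rw [List.drop_eq_getElem_cons h, List.getD_eq_getElem?_getD, List.getElem?_eq_getElem h]
  rfl

lemma window_single (tags : List String) (i : Nat) :
    window tags i (i + 1) = [((i : Int), tags.getD i "")] := by
  unfold window
  simp

-- A's loop from index i with current window [lb, i) equals the reference recursion
lemma loopA_eq_go (tags : List String) :
    ∀ k i lb all, i + k = tags.length → 1 ≤ i → 1 ≤ k → lb < i →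
    (conv2spanLoopA tags tags.length (List.range' i k) all
        (PySem.Dict.mk (window tags lb i))).1 =
      all ++ goSpans tags i (window tags lb i) (tags.drop i) := by
  intro k
  induction k with
  | zero => intro i lb all _ _ h; omega
  | succ m ih =>
    intro i lb all hik hi _ hlb
    have hilt : i < tags.length := by omega
    rw [List.range'_succ]
    simp only [conv2spanLoopA]
    rw [getD_mk_window_last tags lb i hlb]
    rw [if_neg (show ¬ i = 0 by omega)]
    rw [drop_getD_cons tags i hilt]
    have hnew : (PySem.Dict.empty : PySem.Dict Int String).insert (i : Int) (tags.getD i "") =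
        PySem.Dict.mk (window tags i (i + 1)) := by
      apply PySem.Dict.ext
      rw [PySem.Dict.items_insert_of_not_contains _ _ (PySem.Dict.contains_empty (i : Int))]
      rw [window_single]
      rfl
    unfold goSpans
    by_cases hc : pvCont (tags.getD (i - 1) "") (tags.getD i "") = true
    · rw [if_pos hc]
      have hins := insert_mk_window tags lb i (by omega)
      have hcur :
          (if (tags.getD i "" == "I" && (tags.getD (i-1) "" == "B" || tags.getD (i-1) "" == "I")) = true
           then (all, (PySem.Dict.mk (window tags lb i)).insert (i : Int) (tags.getD i ""))
           else if (tags.getD i "" == "O" && tags.getD (i-1) "" == "O") = true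
           then (all, (PySem.Dict.mk (window tags lb i)).insert (i : Int) (tags.getD i ""))
           else (all ++ [(PySem.Dict.mk (window tags lb i)).items],
                 (PySem.Dict.empty : PySem.Dict Int String).insert (i : Int) (tags.getD i ""))) =
          (all, PySem.Dict.mk (window tags lb (i + 1))) := by
        unfold pvCont at hc
        rcases Bool.or_eq_true_iff.mp hc with h1 | h2
        · rw [if_pos h1, hins]
        · by_cases h1 : (tags.getD i "" == "I" && (tags.getD (i-1) "" == "B" || tags.getD (i-1) "" == "I")) = true
          · rw [if_pos h1, hins]
          · rw [if_neg h1, if_pos h2, hins]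
      rw [hcur]
      rw [show window tags lb i ++ [((i : Int), tags.getD i "")] = window tags lb (i + 1) from
        (window_concat tags lb i (by omega)).symm]
      by_cases hm : m = 0
      · subst hm
        rw [if_pos (show i = tags.length - 1 by omega)]
        have : tags.drop (i + 1) = [] := by
          rw [List.drop_eq_nil_iff]; omega
        rw [this]
        rfl
      · rw [if_neg (show ¬ i = tags.length - 1 by omega)]
        exact ih (i + 1) lb all (by omega) (by omega) (by omega) (by omega)
    · rw [if_neg hc]
      have hcur :
          (if (tags.getD i "" == "I" && (tags.getD (i-1) "" == "B" || tags.getD (i-1) "" == "I")) = true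
           then (all, (PySem.Dict.mk (window tags lb i)).insert (i : Int) (tags.getD i ""))
           else if (tags.getD i "" == "O" && tags.getD (i-1) "" == "O") = true
           then (all, (PySem.Dict.mk (window tags lb i)).insert (i : Int) (tags.getD i ""))
           else (all ++ [(PySem.Dict.mk (window tags lb i)).items],
                 (PySem.Dict.empty : PySem.Dict Int String).insert (i : Int) (tags.getD i ""))) =
          (all ++ [window tags lb i], PySem.Dict.mk (window tags i (i + 1))) := by
        unfold pvCont at hc
        have h1 : ¬ (tags.getD i "" == "I" && (tags.getD (i-1) "" == "B" || tags.getD (i-1) "" == "I")) = true := by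
          intro h; exact hc (Bool.or_eq_true_iff.mpr (Or.inl h))
        have h2 : ¬ (tags.getD i "" == "O" && tags.getD (i-1) "" == "O") = true := by
          intro h; exact hc (Bool.or_eq_true_iff.mpr (Or.inr h))
        rw [if_neg h1, if_neg h2, hnew]
      rw [hcur]
      by_cases hm : m = 0
      · subst hm
        rw [if_pos (show i = tags.length - 1 by omega)]
        have : tags.drop (i + 1) = [] := by
          rw [List.drop_eq_nil_iff]; omega
        rw [this]
        unfold goSpans
        simp [conv2spanLoopA, window_single]
      · rw [if_neg (show ¬ i = tags.length - 1 by omega)]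
        rw [show ([((i : Int), tags.getD i "")] : List (Int × String)) = window tags i (i + 1) from
          (window_single tags i).symm]
        rw [ih (i + 1) i (all ++ [window tags lb i]) (by omega) (by omega) (by omega) (by omega)]
        simp

-- the reference recursion equals boundary slices
lemma go_eq_slices (tags : List String) :
    ∀ k i lb, i + k = tags.length → 1 ≤ i → lb < i →
    goSpans tags i (window tags lb i) (tags.drop i) =
      slices tags ((lb :: bnds tags i) ++ [tags.length]) := by
  intro k
  induction k with
  | zero =>
    intro i lb hik hi hlb
    rw [show i = tags.length by omega, List.drop_length]
    unfold bnds
    simp only [Nat.sub_self, List.range'_zero, List.filter_nil]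
    rfl
  | succ m ih =>
    intro i lb hik hi hlb
    have hilt : i < tags.length := by omega
    rw [drop_getD_cons tags i hilt]
    have hb : bnds tags i =
        if !pvCont (tags.getD (i - 1) "") (tags.getD i "") then
          i :: bnds tags (i + 1)
        else bnds tags (i + 1) := by
      unfold bnds
      rw [show tags.length - i = (tags.length - (i + 1)) + 1 by omega, List.range'_succ,
        List.filter_cons]
    unfold goSpans
    by_cases hc : pvCont (tags.getD (i - 1) "") (tags.getD i "") = true
    · rw [if_pos hc, hb]
      simp only [hc, Bool.not_true, if_neg (by simp : ¬ (false = true))]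
      rw [show window tags lb i ++ [((i : Int), tags.getD i "")] = window tags lb (i + 1) from
        (window_concat tags lb i (by omega)).symm]
      exact ih (i + 1) lb (by omega) (by omega) (by omega)
    · rw [if_neg hc, hb]
      simp only [eq_false_of_ne_true hc, Bool.not_false]
      rw [show ([((i : Int), tags.getD i "")] : List (Int × String)) = window tags i (i + 1) from
        (window_single tags i).symm]
      rw [ih (i + 1) i (by omega) (by omega) (by omega)]
      rfl

-- B's zip-of-bounds equals the slices recursion
lemma zip_eq_slices (tags : List String) (n : Nat) :
    ∀ bs : List Nat,
      ((bs.zip (bs.tail ++ [n])).map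
        (fun p => (List.range' p.1 (p.2 - p.1)).map (fun (j : Nat) => ((j : Int), tags.getD j "")))) =
      slices tags (bs ++ [n]) := by
  intro bs
  induction bs with
  | nil => rfl
  | cons b rest ih =>
    cases rest with
    | nil => rfl
    | cons c rest' =>
      simp only [List.tail_cons, List.cons_append, List.zip_cons_cons, List.map_cons] at *
      rw [ih]
      rfl

-- ===== VERDICT (by name: the statement is the Claim_ definition above) =====
theorem conv2span_spec : Claim_equal_conv2span := by
  intro annot_brown _
  unfold Spec_conv2span conv2span conv2span_alt
  generalize (annot_brown.map (fun p => p.2)) = tags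
  show (conv2spanLoopA tags tags.length (List.range tags.length) [] PySem.Dict.empty).1 =
    if tags.length = 0 then []
    else
      ((0 :: (List.range' 1 (tags.length - 1)).filter
          (fun i => !pvCont (tags.getD (i - 1) "") (tags.getD i ""))).zip
        (((0 :: (List.range' 1 (tags.length - 1)).filter
          (fun i => !pvCont (tags.getD (i - 1) "") (tags.getD i ""))).tail) ++ [tags.length])).map
        (fun p => (List.range' p.1 (p.2 - p.1)).map (fun (j : Nat) => ((j : Int), tags.getD j "")))
  rcases Nat.eq_zero_or_pos tags.length with h0 | hpos
  · rw [h0]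
    rfl
  · rw [if_neg (by omega)]
    rw [zip_eq_slices tags tags.length]
    have hr : List.range tags.length = 0 :: List.range' 1 (tags.length - 1) := by
      rw [List.range_eq_range', show tags.length = (tags.length - 1) + 1 by omega,
        List.range'_succ, show (tags.length - 1) + 1 - 1 = tags.length - 1 by omega]
    rw [hr]
    simp only [conv2spanLoopA]
    simp only [if_true]
    have h01 : (PySem.Dict.empty : PySem.Dict Int String).insert (((0 : Nat)) : Int)
        (tags.getD 0 "") = PySem.Dict.mk (window tags 0 1) := by
      apply PySem.Dict.ext
      rw [PySem.Dict.items_insert_of_not_contains _ _ (PySem.Dict.contains_empty _)]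
      rw [window_single]
      rfl
    rw [h01]
    by_cases h1 : tags.length = 1
    · rw [if_pos (by omega : (0 : Nat) = tags.length - 1)]
      rw [show tags.length - 1 = 0 by omega, List.range'_zero]
      show ([] ++ [(PySem.Dict.mk (window tags 0 1)).items] : List (List (Int × String))) =
        slices tags ((0 :: List.filter _ []) ++ [tags.length])
      rw [h1]
      rfl
    · rw [if_neg (by omega : ¬ (0 : Nat) = tags.length - 1)]
      rw [loopA_eq_go tags (tags.length - 1) 1 0 [] (by omega) le_rfl (by omega) (by omega)]
      rw [go_eq_slices tags (tags.length - 1) 1 0 (by omega) le_rfl (by omega)]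
      rfl
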